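-- pv_equiv track=rewrite | github.com/Andaris777/VXLAN | fichier python - iosconfig - V3.py | gen_leaf
-- ===== SOURCE A (Python) =====
-- def gen_leaf(nb_leaf):
--     '''
--
--
--     Parameters
--     ----------
--     nb_leaf : integer
--         DESCRIPTION.
--         number of leafs
--
--     Returns
--     -------
--     [chain_number,chain_OOB] =>
--     chain_number : list of strings
--     chain_OOB : list of strings
--         DESCRIPTION.
--         List of leafs' name for network configuration
--
--     '''
--     #initial variables
--     chain_init_number = 'CPE-ADMIfMIX-SM'
--     chain_number = []
--     counter_leaf = 1
--     counter_pod = 1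
--
--
--     for i in range(0,nb_leaf,1):
--             chain_number.append(chain_init_number+str(counter_pod)+'-A'+str(counter_leaf))
--             counter_leaf = counter_leaf+1
--
--             if counter_leaf > 2:
--                  counter_leaf = 1
--                  counter_pod = counter_pod + 1
--
--     return chain_number
-- ===== SOURCE B (Python) =====
-- def gen_leaf(nb_leaf):
--     # Staged generation: build whole pods (two names each) for ceil(nb_leaf/2)
--     # pods, flatten, and truncate the flat list to the requested length.
--     prefix = 'CPE-ADMIfMIX-SM'
--     nb_pods = (nb_leaf + 1) // 2
--     pods = [[prefix + str(p) + '-A1', prefix + str(p) + '-A2']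
--             for p in range(1, nb_pods + 1)]
--     flat = [name for pod in pods for name in pod]
--     return flat[:nb_leaf]
-- ===== Notes on version B (the rewrite author's own statement) =====
-- stated objective: alternative
-- what changed: B generates names pod-by-pod: it builds complete pods of two literal '-A1'/'-A2' names for ceil(n/2) pod numbers, flattens the nested list, and truncates to n, instead of A's single element-wise loop carrying two mutable counters with a reset branch.
import Mathlib
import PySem

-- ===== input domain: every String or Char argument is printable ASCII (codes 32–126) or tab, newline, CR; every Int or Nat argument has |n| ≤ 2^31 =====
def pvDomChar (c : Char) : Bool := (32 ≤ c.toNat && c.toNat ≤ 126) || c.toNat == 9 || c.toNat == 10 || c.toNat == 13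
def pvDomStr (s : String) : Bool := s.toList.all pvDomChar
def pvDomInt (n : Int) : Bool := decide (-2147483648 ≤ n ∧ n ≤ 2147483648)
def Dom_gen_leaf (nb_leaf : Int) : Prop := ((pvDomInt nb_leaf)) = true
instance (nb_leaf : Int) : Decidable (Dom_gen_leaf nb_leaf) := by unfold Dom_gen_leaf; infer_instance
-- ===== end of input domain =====

-- B builds whole pods of two literal '-A1'/'-A2' names, flattens, and truncates to n,
-- replacing A's element-wise loop with two mutable counters and a reset branch (alternative decomposition).
-- ===== PORT A =====
def gen_leaf (nb_leaf : Int) : List String :=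
  let chain_init_number := "CPE-ADMIfMIX-SM"
  let s := (PySem.List.pyRange 0 nb_leaf 1).foldl
    (fun (st : List String × Int × Int) _i =>
      let (chain_number, counter_leaf, counter_pod) := st
      let chain_number := chain_number ++
        [chain_init_number ++ PySem.Int.toStr counter_pod ++ "-A" ++ PySem.Int.toStr counter_leaf]
      let counter_leaf := counter_leaf + 1
      if counter_leaf > 2 then (chain_number, 1, counter_pod + 1)
      else (chain_number, counter_leaf, counter_pod))
    ([], 1, 1)
  s.1

-- ===== PORT B =====
def gen_leaf_alt (nb_leaf : Int) : List String :=
  let pref := "CPE-ADMIfMIX-SM"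
  let nb_pods := PySem.Int.floordiv (nb_leaf + 1) 2
  let pods := (PySem.List.pyRange 1 (nb_pods + 1) 1).map (fun p =>
    [pref ++ PySem.Int.toStr p ++ "-A1", pref ++ PySem.Int.toStr p ++ "-A2"])
  let flat := pods.flatMap (fun pod => pod)
  PySem.List.slice flat none (some nb_leaf)

-- ===== PRECONDITION & SPEC =====
def Spec_gen_leaf (nb_leaf : Int) (out : List String) : Prop := out = gen_leaf_alt nb_leaf
instance (nb_leaf : Int) (out : List String) : Decidable (Spec_gen_leaf nb_leaf out) := by unfold Spec_gen_leaf; infer_instance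

-- ===== CLAIM =====
def Claim_equal_gen_leaf : Prop := ∀ (nb_leaf : Int), Dom_gen_leaf nb_leaf → Spec_gen_leaf nb_leaf (gen_leaf nb_leaf)

-- ===== LEMMAS AND PROOFS =====

-- the common normal form: the i-th name, by index arithmetic
def pvF (n : Nat) : List String :=
  (PySem.List.pyRange 0 (n : Int) 1).map (fun i =>
    "CPE-ADMIfMIX-SM" ++ PySem.Int.toStr (PySem.Int.floordiv i 2 + 1) ++ "-A" ++
      PySem.Int.toStr (PySem.Int.mod i 2 + 1))

lemma gen_leaf_fold (n : Nat) :
    (PySem.List.pyRange 0 (n : Int) 1).foldl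
      (fun (st : List String × Int × Int) _i =>
        let (chain_number, counter_leaf, counter_pod) := st
        let chain_number := chain_number ++
          ["CPE-ADMIfMIX-SM" ++ PySem.Int.toStr counter_pod ++ "-A" ++ PySem.Int.toStr counter_leaf]
        let counter_leaf := counter_leaf + 1
        if counter_leaf > 2 then (chain_number, 1, counter_pod + 1)
        else (chain_number, counter_leaf, counter_pod))
      ([], 1, 1)
    = ((PySem.List.pyRange 0 (n : Int) 1).map (fun i =>
        "CPE-ADMIfMIX-SM" ++ PySem.Int.toStr (PySem.Int.floordiv i 2 + 1) ++ "-A" ++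
          PySem.Int.toStr (PySem.Int.mod i 2 + 1)),
       ((n : Int) % 2 + 1, (n : Int) / 2 + 1)) := by
  induction n with
  | zero => simp [PySem.List.pyRange_one_eq_nil]
  | succ k ih =>
    have h1 : ((k : Int) + 1 : Int) = ((k + 1 : Nat) : Int) := by push_cast; ring
    have hsr := PySem.List.pyRange_one_succ_right (a := 0) (b := (k : Int)) (by positivity)
    rw [← h1] at *
    rw [hsr, List.foldl_append, List.map_append, ih]
    have hfd : PySem.Int.floordiv (k : Int) 2 = (k : Int) / 2 :=
      PySem.Int.floordiv_eq_ediv_of_pos (by norm_num)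
    have hmd : PySem.Int.mod (k : Int) 2 = (k : Int) % 2 :=
      PySem.Int.mod_eq_emod_of_pos (by norm_num)
    simp only [List.foldl_cons, List.foldl_nil, List.map_cons, List.map_nil, hfd, hmd]
    rcases Int.emod_two_eq_zero_or_one (k : Int) with h | h <;>
      simp [h, Prod.ext_iff] <;> constructor <;> omega

lemma pvF_succ_pair (k : Nat) :
    pvF (2 * k + 2) = pvF (2 * k) ++
      ["CPE-ADMIfMIX-SM" ++ PySem.Int.toStr ((k : Int) + 1) ++ "-A1",
       "CPE-ADMIfMIX-SM" ++ PySem.Int.toStr ((k : Int) + 1) ++ "-A2"] := by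
  unfold pvF
  have h1 : ((2 * k + 2 : Nat) : Int) = ((2 * k + 1 : Nat) : Int) + 1 := by push_cast; ring
  have h2 : ((2 * k + 1 : Nat) : Int) = ((2 * k : Nat) : Int) + 1 := by push_cast; ring
  rw [h1, PySem.List.pyRange_one_succ_right (by positivity), List.map_append,
    h2, PySem.List.pyRange_one_succ_right (by positivity), List.map_append, List.append_assoc]
  congr 1
  have e1 : PySem.Int.floordiv ((2 * k : Nat) : Int) 2 + 1 = (k : Int) + 1 := by
    rw [PySem.Int.floordiv_eq_ediv_of_pos (by norm_num)]; push_cast; omega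
  have e2 : PySem.Int.mod ((2 * k : Nat) : Int) 2 + 1 = (1 : Int) := by
    rw [PySem.Int.mod_eq_emod_of_pos (by norm_num)]; push_cast; omega
  have e3 : PySem.Int.floordiv (((2 * k : Nat) : Int) + 1) 2 + 1 = (k : Int) + 1 := by
    rw [PySem.Int.floordiv_eq_ediv_of_pos (by norm_num)]; push_cast; omega
  have e4 : PySem.Int.mod (((2 * k : Nat) : Int) + 1) 2 + 1 = (2 : Int) := by
    rw [PySem.Int.mod_eq_emod_of_pos (by norm_num)]; push_cast; omega
  have sA1 : ("-A1" : String) = "-A" ++ PySem.Int.toStr 1 := by decide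
  have sA2 : ("-A2" : String) = "-A" ++ PySem.Int.toStr 2 := by decide
  simp only [List.map_cons, List.map_nil, e1, e2, e3, e4, sA1, sA2, List.cons_append,
    List.nil_append, String.append_assoc]

lemma pods_flat (m : Nat) :
    ((PySem.List.pyRange 1 ((m : Int) + 1) 1).map (fun p =>
      ["CPE-ADMIfMIX-SM" ++ PySem.Int.toStr p ++ "-A1",
       "CPE-ADMIfMIX-SM" ++ PySem.Int.toStr p ++ "-A2"])).flatMap (fun pod => pod)
    = pvF (2 * m) := by
  induction m with
  | zero => simp [pvF, PySem.List.pyRange_one_eq_nil]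
  | succ k ih =>
    have h2 : ((k + 1 : Nat) : Int) = (k : Int) + 1 := by push_cast; ring
    have hsr := PySem.List.pyRange_one_succ_right (a := 1) (b := (k : Int) + 1)
      (by omega)
    rw [h2, hsr, List.map_append, List.flatMap_append, ih]
    have h3 : (2 * (k + 1) : Nat) = 2 * k + 2 := by omega
    rw [h3, pvF_succ_pair]
    simp

lemma pvF_take (m n : Nat) (h : n ≤ m) : (pvF m).take n = pvF n := by
  unfold pvF
  rw [PySem.List.pyRange_one (a := 0), PySem.List.pyRange_one (a := 0),
    List.map_map, List.map_map, ← List.map_take, List.take_range]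
  have : ((m : Int) - 0).toNat = m := by omega
  rw [this]
  have : ((n : Int) - 0).toNat = n := by omega
  rw [this, Nat.min_eq_left h]

-- ===== VERDICT =====
theorem gen_leaf_spec : Claim_equal_gen_leaf := by
  intro n _
  unfold Spec_gen_leaf gen_leaf gen_leaf_alt
  by_cases h : n ≤ 0
  · have hp : PySem.Int.floordiv (n + 1) 2 + 1 ≤ 1 := by
      have := PySem.Int.floordiv_eq_ediv_of_pos (a := n + 1) (b := 2) (by norm_num)
      rw [this]; omega
    simp only [PySem.List.pyRange_one_eq_nil h, PySem.List.pyRange_one_eq_nil hp,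
      List.map_nil, List.flatMap_nil, List.foldl_nil]
    simp [PySem.List.slice]
  · obtain ⟨nn, rfl⟩ : ∃ m : Nat, n = (m : Int) := ⟨n.toNat, (Int.toNat_of_nonneg (by omega)).symm⟩
    simp only
    rw [congrArg Prod.fst (gen_leaf_fold nn)]
    have hm : PySem.Int.floordiv ((nn : Int) + 1) 2 = (((nn + 1) / 2 : Nat) : Int) := by
      rw [PySem.Int.floordiv_eq_ediv_of_pos (by norm_num)]; push_cast; omega
    rw [hm, pods_flat ((nn + 1) / 2), PySem.List.slice_to_natCast,
      pvF_take _ _ (by omega)]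
    rfl
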